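-- pv_equiv track=rewrite | github.com/arthurnog/semestre1 | lab16.py | pagsResposta
-- ===== SOURCE A (Python) =====
-- def pagsResposta(palavrasPagina, termosBusca):
-- 	resp = []
-- 	count = 0
-- 	numPag = len(palavrasPagina)
-- 	for i in range(numPag):
-- 		lis = palavrasPagina[i].split()
-- 		for j in range(len(termosBusca)):
-- 			flag = 0
-- 			if termosBusca[j] in lis and flag == 0:
-- 				count += 1
-- 				flag = 1
-- 		if count == len(termosBusca):
-- 			resp.append(1)
-- 		else:
-- 			resp.append(0)
-- 		count = 0
-- 	return resp
-- ===== SOURCE B (Python) =====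
-- def pagsResposta(palavrasPagina, termosBusca):
--     # Inverted index: word -> set of page indices containing it
--     index = {}
--     for i, page in enumerate(palavrasPagina):
--         for w in page.split():
--             s = index.get(w, set())
--             s.add(i)
--             index[w] = s
--     matching = set(range(len(palavrasPagina)))
--     for t in termosBusca:
--         matching = matching & index.get(t, set())
--     return [1 if i in matching else 0 for i in range(len(palavrasPagina))]
-- ===== Notes on version B (the rewrite author's own statement) =====
-- stated objective: faster
-- what changed: Replaces the per-page scan over all search terms (with a list membership test per term) by an inverted index word->set of page indices built in one pass, intersecting the per-term index sets and emitting 1 for pages in the intersection.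
import Mathlib
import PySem

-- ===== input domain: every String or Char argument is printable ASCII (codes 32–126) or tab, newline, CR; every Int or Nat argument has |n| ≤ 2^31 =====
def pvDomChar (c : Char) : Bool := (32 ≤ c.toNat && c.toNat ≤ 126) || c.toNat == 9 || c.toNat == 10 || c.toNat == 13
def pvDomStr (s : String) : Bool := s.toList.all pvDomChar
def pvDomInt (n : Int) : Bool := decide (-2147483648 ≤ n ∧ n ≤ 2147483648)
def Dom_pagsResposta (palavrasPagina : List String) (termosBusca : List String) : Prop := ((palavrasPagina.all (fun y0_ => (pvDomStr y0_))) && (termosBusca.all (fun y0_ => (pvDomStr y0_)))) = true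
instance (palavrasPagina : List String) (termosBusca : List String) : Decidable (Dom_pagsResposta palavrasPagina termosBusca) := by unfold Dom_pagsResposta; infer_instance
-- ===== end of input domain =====

-- B builds an inverted index (word -> set of page indices) and intersects the per-term
-- index sets, instead of A's per-page scan over every term; faster on many pages/terms.

-- ===== PORT A =====
def pagsResposta (palavrasPagina : List String) (termosBusca : List String) : List Int :=
  let numPag : Int := (palavrasPagina.length : Int)
  (PySem.List.pyRange 0 numPag 1).foldl (fun resp i =>
    let lis : List String := PySem.Str.split₀ (PySem.List.pyGetD palavrasPagina i "")
    let count : Int :=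
      (PySem.List.pyRange 0 (termosBusca.length : Int) 1).foldl (fun count j =>
        let flag : Int := 0
        if lis.contains (PySem.List.pyGetD termosBusca j "") && (flag == 0) then count + 1
        else count) 0
    if count == (termosBusca.length : Int) then resp ++ [1] else resp ++ [0]) []

-- ===== PORT B =====
def pvIndex (palavrasPagina : List String) : PySem.Dict String (PySem.Set Int) :=
  (PySem.List.enumerate palavrasPagina 0).foldl (fun d p =>
    (PySem.Str.split₀ p.2).foldl (fun d w =>
      d.insert w (PySem.Set.add (d.getD w PySem.Set.empty) p.1)) d)
    PySem.Dict.empty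

def pagsResposta_alt (palavrasPagina : List String) (termosBusca : List String) : List Int :=
  let index := pvIndex palavrasPagina
  let matching : PySem.Set Int :=
    termosBusca.foldl (fun m t => PySem.Set.inter m (index.getD t PySem.Set.empty))
      (PySem.Set.ofList (PySem.List.pyRange 0 (palavrasPagina.length : Int) 1))
  (PySem.List.pyRange 0 (palavrasPagina.length : Int) 1).map
    (fun i => if PySem.Set.contains matching i then (1 : Int) else 0)

-- ===== PRECONDITION & SPEC =====
def Spec_pagsResposta (palavrasPagina : List String) (termosBusca : List String) (out : List Int) : Prop := out = pagsResposta_alt palavrasPagina termosBusca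
instance (palavrasPagina : List String) (termosBusca : List String) (out : List Int) : Decidable (Spec_pagsResposta palavrasPagina termosBusca out) := by unfold Spec_pagsResposta; infer_instance

-- ===== CLAIM (what is proved, stated in full; the proofs are below) =====
def Claim_equal_pagsResposta : Prop := ∀ (palavrasPagina : List String) (termosBusca : List String), Dom_pagsResposta palavrasPagina termosBusca → Spec_pagsResposta palavrasPagina termosBusca (pagsResposta palavrasPagina termosBusca)

-- ===== LEMMAS AND PROOFS =====

-- ===== VERDICT (by name: the statement is the Claim_ definition above) =====
-- inner fold of the index build
lemma mem_inner_fold (ws : List String) (j : Int) (d : PySem.Dict String (PySem.Set Int))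
    (t : String) (i : Int) :
    i ∈ (ws.foldl (fun d w => d.insert w (PySem.Set.add (d.getD w PySem.Set.empty) j)) d).getD t PySem.Set.empty ↔
      i ∈ d.getD t PySem.Set.empty ∨ (t ∈ ws ∧ i = j) := by
  induction ws generalizing d with
  | nil => simp
  | cons w ws ih =>
    simp only [List.foldl_cons, ih, PySem.Dict.getD_insert, List.mem_cons]
    by_cases h : t = w
    · subst h
      simp
      tauto
    · simp only [if_neg h]
      tauto

lemma mem_index_fold (pp : List String) (s : Int) (d : PySem.Dict String (PySem.Set Int))
    (t : String) (i : Int) :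
    i ∈ ((PySem.List.enumerate pp s).foldl (fun d p =>
        (PySem.Str.split₀ p.2).foldl (fun d w =>
          d.insert w (PySem.Set.add (d.getD w PySem.Set.empty) p.1)) d) d).getD t PySem.Set.empty ↔
      i ∈ d.getD t PySem.Set.empty ∨
        ∃ k : Nat, ∃ h : k < pp.length, i = s + k ∧ t ∈ PySem.Str.split₀ pp[k] := by
  induction pp generalizing s d with
  | nil => simp [PySem.List.enumerate_nil]
  | cons p pp ih =>
    rw [PySem.List.enumerate_cons]
    simp only [List.foldl_cons, ih, mem_inner_fold]
    constructor
    · rintro ((h | ⟨h1, h2⟩) | ⟨k, hk, h1, h2⟩)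
      · exact Or.inl h
      · exact Or.inr ⟨0, by simp, by simpa using h2, by simpa using h1⟩
      · exact Or.inr ⟨k + 1, by simpa using hk, by push_cast at h1 ⊢; omega, by simpa using h2⟩
    · rintro (h | ⟨k, hk, h1, h2⟩)
      · exact Or.inl (Or.inl h)
      · cases k with
        | zero => exact Or.inl (Or.inr ⟨by simpa using h2, by simpa using h1⟩)
        | succ k =>
          refine Or.inr ⟨k, by simpa using hk, by push_cast at h1 ⊢; omega, by simpa using h2⟩

lemma mem_pvIndex (pp : List String) (t : String) (i : Int) :
    i ∈ (pvIndex pp).getD t PySem.Set.empty ↔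
      ∃ k : Nat, ∃ h : k < pp.length, i = (k : Int) ∧ t ∈ PySem.Str.split₀ pp[k] := by
  unfold pvIndex
  rw [mem_index_fold]
  simp

lemma mem_matching_fold (tb : List String) (index : PySem.Dict String (PySem.Set Int))
    (m : PySem.Set Int) (i : Int) :
    i ∈ tb.foldl (fun m t => PySem.Set.inter m (index.getD t PySem.Set.empty)) m ↔
      i ∈ m ∧ ∀ t ∈ tb, i ∈ index.getD t PySem.Set.empty := by
  induction tb generalizing m with
  | nil => simp
  | cons t tb ih =>
    simp only [List.foldl_cons, ih, PySem.Set.mem_inter, List.mem_cons]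
    constructor
    · rintro ⟨⟨h1, h2⟩, h3⟩
      exact ⟨h1, fun u hu => hu.elim (fun e => e ▸ h2) (h3 u)⟩
    · rintro ⟨h1, h2⟩
      exact ⟨⟨h1, h2 t (Or.inl rfl)⟩, fun u hu => h2 u (Or.inr hu)⟩

lemma A_eq_map (pp tb : List String) :
    pagsResposta pp tb = pp.map (fun page =>
      if ∀ t ∈ tb, t ∈ PySem.Str.split₀ page then (1 : Int) else 0) := by
  unfold pagsResposta
  simp only [beq_self_eq_true, Bool.and_true]
  rw [PySem.List.foldl_pyRange_zero_pyGetD' pp ""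
    (f := fun (resp : List Int) (page : String) =>
      if ((PySem.List.pyRange 0 (tb.length : Int) 1).foldl (fun count j =>
            if (PySem.Str.split₀ page).contains (PySem.List.pyGetD tb j "") then count + 1
            else count) (0 : Int)) == (tb.length : Int) then resp ++ [1] else resp ++ [0]) []]
  rw [show (fun (resp : List Int) (page : String) =>
      if ((PySem.List.pyRange 0 (tb.length : Int) 1).foldl (fun count j =>
            if (PySem.Str.split₀ page).contains (PySem.List.pyGetD tb j "") then count + 1
            else count) (0 : Int)) == (tb.length : Int) then resp ++ [1] else resp ++ [0]) =
    (fun (resp : List Int) (page : String) =>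
      resp ++ [if ((PySem.List.pyRange 0 (tb.length : Int) 1).foldl (fun count j =>
            if (PySem.Str.split₀ page).contains (PySem.List.pyGetD tb j "") then count + 1
            else count) (0 : Int)) == (tb.length : Int) then (1 : Int) else 0])
    from by funext resp page; split_ifs <;> rfl]
  rw [PySem.List.foldl_append_singleton_eq_map
    (f := fun page =>
      if ((PySem.List.pyRange 0 (tb.length : Int) 1).foldl (fun count j =>
            if (PySem.Str.split₀ page).contains (PySem.List.pyGetD tb j "") then count + 1
            else count) (0 : Int)) == (tb.length : Int) then (1 : Int) else 0)]
  simp only [List.nil_append]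
  apply List.map_congr_left
  intro page _
  rw [PySem.List.foldl_pyRange_zero_pyGetD' tb ""
    (f := fun (count : Int) (t : String) =>
      if (PySem.Str.split₀ page).contains t then count + 1 else count) 0]
  rw [PySem.List.foldl_if_add_one (p := fun t => (PySem.Str.split₀ page).contains t)]
  have hcast : ((0 : Int) + ((tb.countP fun t => (PySem.Str.split₀ page).contains t : Nat) : Int)
      == (tb.length : Int)) = true ↔
      (tb.countP fun t => (PySem.Str.split₀ page).contains t) = tb.length := by
    simp only [zero_add, beq_iff_eq]
    exact_mod_cast Iff.rfl
  by_cases hall : ∀ t ∈ tb, t ∈ PySem.Str.split₀ page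
  · rw [if_pos, if_pos hall]
    rw [hcast, List.countP_eq_length]
    intro t ht
    simpa using hall t ht
  · rw [if_neg, if_neg hall]
    rw [hcast, List.countP_eq_length]
    intro hc
    exact hall (fun t ht => by simpa using hc t ht)

lemma B_eq_map (pp tb : List String) :
    pagsResposta_alt pp tb = (List.range pp.length).map (fun k =>
      if ∃ h : k < pp.length, ∀ t ∈ tb, t ∈ PySem.Str.split₀ pp[k] then (1 : Int) else 0) := by
  unfold pagsResposta_alt
  rw [PySem.List.pyRange_one]
  simp only [sub_zero, Int.toNat_natCast, List.map_map, zero_add]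
  apply List.map_congr_left
  intro k hk
  rw [List.mem_range] at hk
  simp only [Function.comp_apply]
  have hiff : (PySem.Set.contains
      (tb.foldl (fun m t => PySem.Set.inter m ((pvIndex pp).getD t PySem.Set.empty))
        (PySem.Set.ofList (List.map (fun k : Nat => (k : Int)) (List.range pp.length)))) ((k : Nat) : Int) = true) ↔
      (∃ _ : k < pp.length, ∀ t ∈ tb, t ∈ PySem.Str.split₀ pp[k]) := by
    rw [PySem.Set.contains_iff, mem_matching_fold]
    constructor
    · rintro ⟨_, h2⟩
      refine ⟨hk, fun t ht => ?_⟩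
      obtain ⟨k2, hk2, he, hw⟩ := (mem_pvIndex pp t _).1 (h2 t ht)
      have : k2 = k := by omega
      subst this
      exact hw
    · rintro ⟨_, h⟩
      refine ⟨?_, fun t ht => (mem_pvIndex pp t _).2 ⟨k, hk, rfl, h t ht⟩⟩
      rw [PySem.Set.mem_ofList, List.mem_map]
      exact ⟨k, by simpa using hk, rfl⟩
  rw [if_congr hiff rfl rfl]

-- ===== VERDICT =====
theorem pagsResposta_spec : Claim_equal_pagsResposta := by
  intro pp tb _
  unfold Spec_pagsResposta
  rw [A_eq_map, B_eq_map]
  apply List.ext_getElem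
  · simp
  · intro k h1 h2
    simp only [List.getElem_map, List.getElem_range]
    have hk : k < pp.length := by simpa using h1
    by_cases hall : ∀ t ∈ tb, t ∈ PySem.Str.split₀ pp[k]
    · rw [if_pos hall, if_pos ⟨hk, hall⟩]
    · rw [if_neg hall, if_neg (by rintro ⟨_, h⟩; exact hall h)]
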